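-- pv_equiv track=rewrite | github.com/miliar/Code_Jam_Webscraper | Solutions_python/Problem_203/57.py | process
-- ===== SOURCE A (Python) =====
-- def line(C, s):
--   if s == '?' * C:
--     return None
--   else:
--     def gen():
--       last = '?'
--       for c in s:
--         last = last if c == '?' else c
--         if last != '?':
--           yield last
--     t = ''.join(gen())
--     return t[0] * (C - len(t)) + t
--
-- def process(R, C, A):
--   def gen():
--     last = None
--     for r in (line(C, s) for s in A):
--       last = last if r is None else r
--       if last is not None:
--         yield last
--   t = list(gen())
--   return [t[0]] * (R - len(t)) + t
-- ===== SOURCE B (Python) =====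
-- def _fill_line(C, s):
--     i = 0
--     while i < len(s) and s[i] == '?':
--         i += 1
--     if i == len(s):
--         return None
--     tail = list(s[i:])
--     for k in range(1, len(tail)):
--         if tail[k] == '?':
--             tail[k] = tail[k - 1]
--     first = tail[0]
--     return first * (C - len(tail)) + ''.join(tail)
--
-- def process(R, C, A):
--     rows = [_fill_line(C, s) for s in A]
--     j = 0
--     while rows[j] is None:
--         j += 1
--     out = rows[j:]
--     for k in range(1, len(out)):
--         if out[k] is None:
--             out[k] = out[k - 1]
--     return [out[0]] * (R - len(out)) + out
-- ===== Notes on version B (the rewrite author's own statement) =====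
-- stated objective: alternative
-- what changed: Replaces A's nested generator pipelines (stateful yield-if-last-known loops plus front padding computed from the emitted length) at both levels by explicit list passes: drop the leading '?'/None run with a scan, one in-place forward-fill pass over the remaining suffix, then pad in front with the first filled element.
import Mathlib
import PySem

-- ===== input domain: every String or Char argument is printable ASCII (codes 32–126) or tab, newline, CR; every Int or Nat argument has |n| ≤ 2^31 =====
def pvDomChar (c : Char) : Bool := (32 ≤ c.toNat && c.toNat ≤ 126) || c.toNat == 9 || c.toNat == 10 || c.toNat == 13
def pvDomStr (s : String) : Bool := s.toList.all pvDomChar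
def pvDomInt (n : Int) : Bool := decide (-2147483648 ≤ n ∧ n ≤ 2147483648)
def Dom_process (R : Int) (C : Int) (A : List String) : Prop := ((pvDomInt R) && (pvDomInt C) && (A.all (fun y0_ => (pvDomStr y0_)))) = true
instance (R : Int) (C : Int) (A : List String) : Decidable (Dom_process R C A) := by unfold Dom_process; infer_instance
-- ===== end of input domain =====

-- B replaces A's generator pipeline by explicit drop-leading-run / forward-fill passes (alternative
-- decomposition, same cost); equivalence is about the RETURN value only.

-- ===== PORT A =====
-- the inner generator of `line`: fold carrying (last, emitted-so-far)
def lineStep (st : Char × List Char) (c : Char) : Char × List Char :=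
  let last := if c = '?' then st.1 else c
  (last, if last ≠ '?' then st.2 ++ [last] else st.2)

def lineGen (s : List Char) : List Char := (s.foldl lineStep ('?', [])).2

-- port of `line`; `t[0]` raises IndexError when t = [] (outside Pre_process), `headD '?'` stands in there
def lineA (C : Int) (s : String) : Option String :=
  if s.toList = List.replicate C.toNat '?' then none
  else
    let t := lineGen s.toList
    some (String.ofList (List.replicate (C - t.length).toNat (t.headD '?') ++ t))

-- the generator of `process`: fold carrying (last, emitted-so-far); element = line's result
def procStep (st : Option String × List String) (o : Option String) : Option String × List String :=
  let last := match o with | none => st.1 | some r => some r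
  (last, match last with | none => st.2 | some v => st.2 ++ [v])

-- port of A's `process`; `t[0]` raises IndexError when t = [] (outside Pre_process), `headD ""` stands in there
def process (R : Int) (C : Int) (A : List String) : List String :=
  let t := (A.foldl (fun st s => procStep st (lineA C s)) (none, [])).2
  List.replicate (R - t.length).toNat (t.headD "") ++ t

-- ===== PORT B =====
-- B's in-place forward pass: each '?' becomes the previous (already filled) char
def fillFrom (prev : Char) : List Char → List Char
  | [] => []
  | c :: cs =>
      let c' := if c = '?' then prev else c
      c' :: fillFrom c' cs

-- port of `_fill_line`: the leading-'?' while-loop is dropWhile; all-'?' → None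
def lineB (C : Int) (s : String) : Option String :=
  match s.toList.dropWhile (fun x => x == '?') with
  | [] => none
  | c :: cs =>
      let tail := c :: fillFrom c cs
      some (String.ofList (List.replicate (C - tail.length).toNat c ++ tail))

-- B's in-place forward pass over rows: each None becomes the previous filled row
def fillRows (prev : String) : List (Option String) → List String
  | [] => []
  | o :: rest =>
      let v := o.getD prev
      v :: fillRows v rest

-- port of B's `process`; the `rows[j]` search is dropWhile; when every row is None the Python
-- raises IndexError (outside Pre_process), `[]` stands in there
def process_alt (R : Int) (C : Int) (A : List String) : List String :=
  let rows := A.map (lineB C)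
  match rows.dropWhile Option.isNone with
  | [] => []
  | o :: rest =>
      let v := o.getD ""
      let out := v :: fillRows v rest
      List.replicate (R - out.length).toNat v ++ out

-- ===== PRECONDITION & SPEC =====
-- Pre_ excludes exactly the inputs where A raises IndexError: inputs with no non-'?' character at
-- all (no row is ever emitted, t[0] fails) and inputs containing an all-'?' row that is not
-- exactly '?' * C (line's t[0] fails on it).
def Pre_process (R : Int) (C : Int) (A : List String) : Prop :=
  (∃ s ∈ A, s.toList.any (fun c => c != '?') = true) ∧
  (∀ s ∈ A, s.toList.any (fun c => c != '?') = true ∨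
    (s.toList.all (fun c => c == '?') = true ∧ s.toList.length = C.toNat))
instance (R : Int) (C : Int) (A : List String) : Decidable (Pre_process R C A) := by
  unfold Pre_process; infer_instance

def pvWitness_process : Int × Int × List String := (2, 3, ["?b?", "???"])

def Spec_process (R : Int) (C : Int) (A : List String) (out : List String) : Prop := out = process_alt R C A
instance (R : Int) (C : Int) (A : List String) (out : List String) : Decidable (Spec_process R C A out) := by unfold Spec_process; infer_instance

-- ===== CLAIM (what is proved, stated in full; the proofs are below) =====
def Claim_equal_process : Prop := ∀ (R : Int) (C : Int) (A : List String), Dom_process R C A → Pre_process R C A → Spec_process R C A (process R C A)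
-- ===== LEMMAS AND PROOFS =====

-- a leading all-'?' run leaves lineStep's state unchanged
theorem lineStep_prefix (q : List Char) (acc : List Char)
    (hq : ∀ c ∈ q, c = '?') : q.foldl lineStep ('?', acc) = ('?', acc) := by
  induction q with
  | nil => rfl
  | cons a q ih =>
      have ha : a = '?' := hq a (List.mem_cons_self ..)
      simp only [List.foldl_cons, lineStep, ha]
      simp only [ne_eq]
      exact ih (fun c hc => hq c (List.mem_cons_of_mem _ hc))

-- once last ≠ '?', every step emits and behaves like fillFrom
theorem lineStep_run (cs : List Char) (p : Char) (acc : List Char) (hp : p ≠ '?') :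
    (cs.foldl lineStep (p, acc)).2 = acc ++ fillFrom p cs := by
  induction cs generalizing p acc with
  | nil => simp [fillFrom]
  | cons c cs ih =>
      by_cases hc : c = '?'
      · simp only [List.foldl_cons, lineStep, hc, fillFrom]
        simp only [ne_eq, hp, not_false_eq_true, if_pos]
        rw [ih p _ hp]; simp
      · simp only [List.foldl_cons, lineStep, if_neg hc, fillFrom]
        simp only [ne_eq, hc, not_false_eq_true, if_pos]
        rw [ih c _ hc]; simp

theorem dropWhile_head_false {α : Type} (p : α → Bool) (l : List α) (c : α) (cs : List α)
    (h : l.dropWhile p = c :: cs) : p c = false := by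
  induction l with
  | nil => simp at h
  | cons a l ih =>
      rw [List.dropWhile_cons] at h
      by_cases hp : p a = true
      · rw [if_pos hp] at h; exact ih h
      · rw [if_neg hp] at h
        obtain ⟨rfl, -⟩ := List.cons.inj h
        simpa using hp

theorem lineGen_eq (s : List Char) (c : Char) (cs : List Char)
    (h : s.dropWhile (fun x => x == '?') = c :: cs) :
    lineGen s = c :: fillFrom c cs := by
  have hc : (c == '?') = false := dropWhile_head_false (fun x => x == '?') s c cs h
  have hc' : c ≠ '?' := by simpa using hc
  have hs : s.takeWhile (fun x => x == '?') ++ (c :: cs) = s := by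
    rw [← h]; exact List.takeWhile_append_dropWhile
  have hq : ∀ x ∈ s.takeWhile (fun x => x == '?'), x = '?' := by
    intro x hx
    have := List.mem_takeWhile_imp hx
    simpa using this
  unfold lineGen
  rw [← hs, List.foldl_append, lineStep_prefix _ _ hq]
  simp only [List.foldl_cons, lineStep, if_neg hc']
  simp only [ne_eq, hc', not_false_eq_true, if_pos]
  rw [List.nil_append]
  rw [lineStep_run cs c [c] hc']
  rfl

-- the two line fills agree on every admitted row
theorem line_eq (C : Int) (s : String)
    (h : (∃ c ∈ s.toList, c ≠ '?') ∨ s.toList = List.replicate C.toNat '?') :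
    lineA C s = lineB C s := by
  rcases h with ⟨c0, hc0m, hc0⟩ | hrep
  · have hnr : s.toList ≠ List.replicate C.toNat '?' := by
      intro he
      exact hc0 ((List.eq_of_mem_replicate (he ▸ hc0m)))
    have hdw : s.toList.dropWhile (fun x => x == '?') ≠ [] := by
      intro he
      rw [List.dropWhile_eq_nil_iff] at he
      exact hc0 (by simpa using he c0 hc0m)
    unfold lineA lineB
    rw [if_neg hnr]
    rcases hh : s.toList.dropWhile (fun x => x == '?') with _ | ⟨c, cs⟩
    · exact absurd hh hdw
    · rw [lineGen_eq s.toList c cs hh]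
      simp
  · unfold lineA lineB
    rw [if_pos hrep, hrep]
    have : (List.replicate C.toNat '?').dropWhile (fun x => x == '?') = [] := by
      rw [List.dropWhile_eq_nil_iff]
      intro x hx
      simp [List.eq_of_mem_replicate hx]
    rw [this]

-- a leading all-None run leaves procStep's state unchanged
theorem procStep_prefix (q : List (Option String)) (acc : List String)
    (hq : ∀ o ∈ q, o = none) : q.foldl procStep (none, acc) = (none, acc) := by
  induction q with
  | nil => rfl
  | cons a q ih =>
      have ha : a = none := hq a (List.mem_cons_self ..)
      subst ha
      simp only [List.foldl_cons, procStep]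
      exact ih (fun o ho => hq o (List.mem_cons_of_mem _ ho))

-- once last = some p, every step emits and behaves like fillRows
theorem procStep_run (rest : List (Option String)) (p : String) (acc : List String) :
    (rest.foldl procStep (some p, acc)).2 = acc ++ fillRows p rest := by
  induction rest generalizing p acc with
  | nil => simp [fillRows]
  | cons o rest ih =>
      cases o with
      | none =>
          simp only [List.foldl_cons, procStep, fillRows, Option.getD]
          rw [ih p _]; simp
      | some r =>
          simp only [List.foldl_cons, procStep, fillRows, Option.getD]
          rw [ih r _]; simp

-- Bool-level row condition of Pre_process implies the Prop form line_eq consumes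
theorem row_conv (C : Int) (s : String)
    (h : s.toList.any (fun c => c != '?') = true ∨
      (s.toList.all (fun c => c == '?') = true ∧ s.toList.length = C.toNat)) :
    (∃ c ∈ s.toList, c ≠ '?') ∨ s.toList = List.replicate C.toNat '?' := by
  rcases h with h | ⟨hall, hlen⟩
  · left; simpa [List.any_eq_true, bne_iff_ne] using h
  · right
    rw [List.eq_replicate_iff]
    exact ⟨hlen, fun b hb => by simpa using List.all_eq_true.mp hall b hb⟩

theorem process_eq (R C : Int) (A : List String) (h : Pre_process R C A) :
    process R C A = process_alt R C A := by
  obtain ⟨⟨s0, hs0A, hs0b⟩, hall⟩ := h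
  have hs0 : ∃ c ∈ s0.toList, c ≠ '?' := by
    simpa [List.any_eq_true, bne_iff_ne] using hs0b
  have hrows : A.map (lineB C) = A.map (lineA C) := by
    apply List.map_congr_left
    intro s hs
    exact (line_eq C s (row_conv C s (hall s hs))).symm
  -- the first non-None row exists
  have hs0some : (lineA C s0).isNone = false := by
    obtain ⟨c0, hc0m, hc0⟩ := hs0
    have hnr : s0.toList ≠ List.replicate C.toNat '?' := by
      intro he
      exact hc0 ((List.eq_of_mem_replicate (he ▸ hc0m)))
    unfold lineA
    rw [if_neg hnr]
    rfl
  have hdw : (A.map (lineA C)).dropWhile Option.isNone ≠ [] := by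
    intro he
    rw [List.dropWhile_eq_nil_iff] at he
    have := he (lineA C s0) (List.mem_map_of_mem hs0A)
    rw [hs0some] at this
    exact absurd this (by simp)
  rcases hh : (A.map (lineA C)).dropWhile Option.isNone with _ | ⟨o, rest⟩
  · exact absurd hh hdw
  · have ho : o.isNone = false := dropWhile_head_false _ _ _ _ hh
    obtain ⟨v, hv⟩ : ∃ v, o = some v := by
      cases o with
      | none => simp at ho
      | some v => exact ⟨v, rfl⟩
    subst hv
    have hsplit : (A.map (lineA C)).takeWhile Option.isNone ++ (some v :: rest) = A.map (lineA C) := by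
      rw [← hh]; exact List.takeWhile_append_dropWhile
    have hq : ∀ x ∈ (A.map (lineA C)).takeWhile Option.isNone, x = none := by
      intro x hx
      have := List.mem_takeWhile_imp hx
      cases x with
      | none => rfl
      | some _ => simp at this
    have hfold : (A.foldl (fun st s => procStep st (lineA C s)) (none, [])).2
        = v :: fillRows v rest := by
      rw [show (A.foldl (fun st s => procStep st (lineA C s)) (none, []))
            = ((A.map (lineA C)).foldl procStep (none, [])) by rw [List.foldl_map]]
      rw [← hsplit, List.foldl_append, procStep_prefix _ _ hq]
      simp only [List.foldl_cons, procStep]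
      rw [List.nil_append]
      rw [procStep_run rest v [v]]
      simp
    simp only [process, process_alt, hrows, hh, hfold]
    simp

-- ===== VERDICT (by name: the statement is the Claim_ definition above) =====
theorem process_spec : Claim_equal_process := by
  intro R C A _ hpre
  unfold Spec_process
  exact process_eq R C A hpre
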